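-- pv_equiv track=rewrite | github.com/zjwang11/IRSSG | src_mom2ssg/smith_form/modified_smith_tool.py | find_least_num_of_same_rank
-- ===== SOURCE A (Python) =====
-- def num_rank(num, Z):
--     # return the rank of num in Zn group
--     assert num % 1 == 0 and 0 <= num < Z, (num, Z)
--     for time in range(1,Z+1):
--         if (num * time) % Z == 0:
--             return time
--
-- def find_least_num_of_same_rank(num, Z):
--     # find the least num that has the same rank with num in Zn group.
--     if num in [0, 1]:
--         return num, 1
--
--     rank0 = num_rank(num, Z)
--     least_num, time = num, 1
--     for tmp_time in range(1,Z):
--         tmp_num = (tmp_time * num) % Z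
--         tmp_rank = num_rank(tmp_num, Z)
--         if tmp_rank == rank0 and tmp_num < least_num:
--             least_num, time = tmp_num, tmp_time
--     return least_num, time
-- ===== SOURCE B (Python) =====
-- def find_least_num_of_same_rank(num, Z):
--     # find the least num that has the same rank with num in Zn group.
--     if num in [0, 1]:
--         return num, 1
--     assert num % 1 == 0 and 0 <= num < Z, (num, Z)
--     # extended Euclid on (num, Z): old_r = gcd, old_s * num == old_r (mod Z)
--     old_r, r = num, Z
--     old_s, s = 1, 0
--     while r != 0:
--         q = old_r // r
--         old_r, r = r, old_r - q * r
--         old_s, s = s, old_s - q * s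
--     g = old_r
--     t = old_s % (Z // g)
--     return g, t
-- ===== Notes on version B (the rewrite author's own statement) =====
-- stated objective: faster
-- what changed: Replaces the double scan (O(Z) rank computation inside an O(Z) loop over all multiples) by a single extended-Euclid run: least element of the same rank is gcd(num,Z) and the witness time is the modular inverse of num/g modulo Z/g.
import Mathlib
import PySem

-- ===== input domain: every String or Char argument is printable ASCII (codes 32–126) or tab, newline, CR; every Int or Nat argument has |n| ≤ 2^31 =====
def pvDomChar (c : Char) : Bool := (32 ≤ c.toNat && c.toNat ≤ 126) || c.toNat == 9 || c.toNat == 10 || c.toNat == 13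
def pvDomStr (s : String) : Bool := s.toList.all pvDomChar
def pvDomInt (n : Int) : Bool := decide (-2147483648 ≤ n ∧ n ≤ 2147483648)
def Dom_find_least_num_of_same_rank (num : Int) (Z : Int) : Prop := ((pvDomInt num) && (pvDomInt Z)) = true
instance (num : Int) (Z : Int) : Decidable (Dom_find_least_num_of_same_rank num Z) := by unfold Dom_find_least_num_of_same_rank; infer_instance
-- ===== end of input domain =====

-- B replaces A's O(Z^2) double scan with one extended-Euclid run (least same-rank element
-- is gcd(num,Z), the time is the modular inverse of num/g mod Z/g); equivalence on Pre_.

-- ===== PORT A =====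
-- assert failure (a raise) is ported as none; Pre_ excludes those inputs.
-- Falling off the loop returns Python None (also none) — unreachable under Pre_.
def num_rank (num : Int) (Z : Int) : Option Int :=
  if PySem.Int.mod num 1 = 0 ∧ 0 ≤ num ∧ num < Z then
    (PySem.List.pyRange 1 (Z + 1) 1).find? (fun t => PySem.Int.mod (num * t) Z == 0)
  else none

def find_least_num_of_same_rank (num : Int) (Z : Int) : List Int :=
  if num = 0 ∨ num = 1 then [num, 1]
  else
    match num_rank num Z with
    | none => []   -- Python raises AssertionError here; excluded by Pre_
    | some rank0 =>
      let p := (PySem.List.pyRange 1 Z 1).foldl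
        (fun (p : Int × Int) tmp_time =>
          let tmp_num := PySem.Int.mod (tmp_time * num) Z
          let tmp_rank := num_rank tmp_num Z
          if tmp_rank = some rank0 ∧ tmp_num < p.1 then (tmp_num, tmp_time) else p)
        (num, 1)
      [p.1, p.2]

-- ===== PORT B =====
-- termination helper for the while loop
theorem pv_natAbs_fmod_lt (a r : Int) (h : r ≠ 0) : (Int.fmod a r).natAbs < r.natAbs := by
  have he := @Int.fmod_eq_emod a r
  have h1 := Int.emod_nonneg a h
  have h2 : a % r < (r.natAbs : Int) := Int.emod_lt a h
  split at he <;> omega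

-- The extended-Euclid while loop of Source B, step for step.
def egcdLoop (old_r : Int) (r : Int) (old_s : Int) (s : Int) : Int × Int :=
  if h : r = 0 then (old_r, old_s)
  else
    let q := PySem.Int.floordiv old_r r
    egcdLoop r (old_r - q * r) s (old_s - q * s)
termination_by r.natAbs
decreasing_by
  have hm : old_r - PySem.Int.floordiv old_r r * r = PySem.Int.mod old_r r := by
    have := PySem.Int.floordiv_mul_add_mod old_r r
    omega
  simp only [hm, PySem.Int.mod]
  exact pv_natAbs_fmod_lt old_r r h

def find_least_num_of_same_rank_alt (num : Int) (Z : Int) : List Int :=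
  if num = 0 ∨ num = 1 then [num, 1]
  else if PySem.Int.mod num 1 = 0 ∧ 0 ≤ num ∧ num < Z then
    let gs := egcdLoop num Z 1 0
    let g := gs.1
    let t := PySem.Int.mod gs.2 (PySem.Int.floordiv Z g)
    [g, t]
  else []  -- the assert raises here; excluded by Pre_

-- ===== PRECONDITION & SPEC =====
-- Pre_ excludes exactly the inputs where A raises AssertionError (num outside [0, Z) and not 0/1).
def Pre_find_least_num_of_same_rank (num : Int) (Z : Int) : Prop :=
  num = 0 ∨ num = 1 ∨ (2 ≤ num ∧ num < Z)
instance (num : Int) (Z : Int) : Decidable (Pre_find_least_num_of_same_rank num Z) := by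
  unfold Pre_find_least_num_of_same_rank; infer_instance
def pvWitness_find_least_num_of_same_rank : Int × Int := (2, 5)

def Spec_find_least_num_of_same_rank (num : Int) (Z : Int) (out : List Int) : Prop := out = find_least_num_of_same_rank_alt num Z
instance (num : Int) (Z : Int) (out : List Int) : Decidable (Spec_find_least_num_of_same_rank num Z out) := by unfold Spec_find_least_num_of_same_rank; infer_instance

-- ===== CLAIM (what is proved, stated in full; the proofs are below) =====
def Claim_equal_find_least_num_of_same_rank : Prop := ∀ (num : Int) (Z : Int), Dom_find_least_num_of_same_rank num Z → Pre_find_least_num_of_same_rank num Z → Spec_find_least_num_of_same_rank num Z (find_least_num_of_same_rank num Z)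

-- ===== LEMMAS AND PROOFS =====

-- Z | x*num  ↔  (Z / gcd num Z) | x   (for 0 ≤ num, 0 < Z)
theorem pv_dvd_iff (num Z x : Int) (h0 : 0 ≤ num) (hZ : 0 < Z) :
    Z ∣ x * num ↔ (Z / (Int.gcd num Z : Int)) ∣ x := by
  have hgne : Int.gcd num Z ≠ 0 := by
    intro hc; rw [Int.gcd_eq_zero_iff] at hc; omega
  have hcop0 := Int.gcd_div_gcd_div_gcd (i := num) (j := Z) (Nat.pos_of_ne_zero hgne)
  set G : Int := (Int.gcd num Z : Int) with hG
  have hGpos : 0 < G := by rw [hG]; exact_mod_cast Nat.pos_of_ne_zero hgne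
  have hgnum : G ∣ num := Int.gcd_dvd_left num Z
  have hgZ : G ∣ Z := Int.gcd_dvd_right num Z
  have hn' : G * (num / G) = num := Int.mul_ediv_cancel' hgnum
  have hZ' : G * (Z / G) = Z := Int.mul_ediv_cancel' hgZ
  have hcop : Int.gcd (Z / G) (num / G) = 1 := by rw [Int.gcd_comm]; exact hcop0
  generalize ha : num / G = a at hn' hcop
  generalize hb : Z / G = b at hZ' hcop ⊢
  constructor
  · intro h
    have h2 : G * b ∣ G * (x * a) := by
      rw [hZ']
      have he : x * num = G * (x * a) := by rw [← hn']; ring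
      rw [← he]; exact h
    have h3 : b ∣ a * x := by
      have := (mul_dvd_mul_iff_left (ne_of_gt hGpos)).mp h2
      rwa [mul_comm x a] at this
    exact Int.dvd_of_dvd_mul_right_of_gcd_one h3 hcop
  · rintro ⟨k, rfl⟩
    exact ⟨k * a, by rw [← hn', ← hZ']; ring⟩

-- positive divisors of a positive Z with equal cofactors are equal
theorem pv_div_inj (Z a b : Int) (hZ : 0 < Z) (ha : a ∣ Z) (hb : b ∣ Z)
    (ha0 : 0 < a) (hb0 : 0 < b) (h : Z / a = Z / b) : a = b := by
  have h1 : a * (Z / a) = Z := Int.mul_ediv_cancel' ha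
  have h2 : b * (Z / b) = Z := Int.mul_ediv_cancel' hb
  have hw : 0 < Z / b := by nlinarith
  rw [h] at h1
  exact mul_right_cancel₀ (ne_of_gt hw) (h1.trans h2.symm)

-- find? over range [a, b) of a predicate "d divides" returns the first multiple d
theorem pv_find_first (p : Int → Bool) (d b : Int) (hd : 1 ≤ d) (hb : d < b)
    (hp : ∀ t : Int, p t = true ↔ d ∣ t) :
    ∀ n : Nat, ∀ a : Int, (d - a).toNat = n → 1 ≤ a → a ≤ d →
    (PySem.List.pyRange a b 1).find? p = some d := by
  intro n
  induction n with
  | zero =>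
    intro a hn ha1 ha2
    have : a = d := by omega
    subst this
    rw [PySem.List.pyRange_one_cons (by omega : a < b)]
    have hpd : p a = true := (hp a).mpr dvd_rfl
    simp [List.find?, hpd]
  | succ k ih =>
    intro a hn ha1 ha2
    have halt : a < d := by omega
    rw [PySem.List.pyRange_one_cons (by omega : a < b)]
    have hpa : p a = false := by
      cases hpa' : p a with
      | false => rfl
      | true =>
        have hdvd := (hp a).mp hpa'
        have := Int.le_of_dvd (by omega) hdvd
        omega
    rw [List.find?_cons_of_neg (by simp [hpa])]
    exact ih (a + 1) (by omega) (by omega) (by omega)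

-- num_rank m Z = Z / gcd(m, Z) for 0 ≤ m < Z
theorem pv_rank_eq (m Z : Int) (h0 : 0 ≤ m) (h1 : m < Z) :
    num_rank m Z = some (Z / (Int.gcd m Z : Int)) := by
  have hZ : 0 < Z := by omega
  have hgne : Int.gcd m Z ≠ 0 := by
    intro hc; rw [Int.gcd_eq_zero_iff] at hc; omega
  have hGpos : (0:Int) < (Int.gcd m Z : Int) := by exact_mod_cast Nat.pos_of_ne_zero hgne
  have hgZ : ((Int.gcd m Z : Int)) ∣ Z := Int.gcd_dvd_right m Z
  have hmul : (Int.gcd m Z : Int) * (Z / (Int.gcd m Z : Int)) = Z := Int.mul_ediv_cancel' hgZ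
  have hd1 : 1 ≤ Z / (Int.gcd m Z : Int) := by nlinarith
  have hdZ : Z / (Int.gcd m Z : Int) ≤ Z := by
    refine Int.le_of_dvd hZ ⟨(Int.gcd m Z : Int), ?_⟩
    rw [mul_comm]; exact hmul.symm
  have hmod1 : PySem.Int.mod m 1 = 0 := by
    rw [PySem.Int.mod_eq_emod_of_pos (by norm_num)]; exact Int.emod_one m
  unfold num_rank
  rw [if_pos ⟨hmod1, h0, h1⟩]
  refine pv_find_first _ _ (Z + 1) hd1 (by omega) ?_ (Z / (Int.gcd m Z : Int) - 1).toNat 1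
    (by omega) (by omega) hd1
  intro t
  rw [PySem.Int.mod_eq_emod_of_pos hZ]
  have : ((m * t) % Z == 0) = true ↔ Z ∣ m * t := by
    simp only [beq_iff_eq]
    exact ⟨Int.dvd_of_emod_eq_zero, Int.emod_eq_zero_of_dvd⟩
  rw [this, mul_comm m t]
  exact pv_dvd_iff m Z t h0 hZ

-- invariant of the extended-Euclid while loop
theorem pv_egcd (num Z : Int) :
    ∀ (old_r r old_s s : Int), 0 < old_r → 0 ≤ r →
    Int.ModEq Z (old_s * num) old_r → Int.ModEq Z (s * num) r →
    (∀ c : Int, (c ∣ old_r ∧ c ∣ r) ↔ (c ∣ num ∧ c ∣ Z)) →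
    (egcdLoop old_r r old_s s).1 = (Int.gcd num Z : Int) ∧
    Int.ModEq Z ((egcdLoop old_r r old_s s).2 * num) (Int.gcd num Z : Int) := by
  intro old_r r old_s s
  induction old_r, r, old_s, s using egcdLoop.induct with
  | case1 old_r old_s s =>
    intro h1 h2 h3 h4 h5
    rw [egcdLoop]
    simp only [dif_pos rfl]
    have hda : ((Int.gcd num Z : Int)) ∣ old_r :=
      ((h5 (Int.gcd num Z : Int)).mpr ⟨Int.gcd_dvd_left num Z, Int.gcd_dvd_right num Z⟩).1
    have hd2 := (h5 old_r).mp ⟨dvd_rfl, dvd_zero _⟩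
    have h6 : ((old_r.natAbs : Int)) = old_r := Int.natAbs_of_nonneg (le_of_lt h1)
    have h7 : old_r.natAbs ∣ Int.gcd num Z :=
      Int.dvd_gcd (by rw [h6]; exact hd2.1) (by rw [h6]; exact hd2.2)
    have h8 : old_r ∣ ((Int.gcd num Z : Int)) := by
      rw [← h6]; exact_mod_cast Int.natCast_dvd_natCast.mpr h7
    have heq : old_r = (Int.gcd num Z : Int) :=
      Int.dvd_antisymm (le_of_lt h1) (by positivity) h8 hda
    exact ⟨heq, heq ▸ h3⟩
  | case2 old_r r old_s s h q ih =>
    intro h1 h2 h3 h4 h5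
    have hr : 0 < r := lt_of_le_of_ne h2 (Ne.symm h)
    have hqdef : q = PySem.Int.floordiv old_r r := rfl
    rw [egcdLoop]
    simp only [dif_neg h]
    have hq : q = old_r / r := hqdef.trans (PySem.Int.floordiv_eq_ediv_of_pos hr)
    have hnr : old_r - q * r = old_r % r := by
      rw [hq, Int.emod_def]; ring
    refine ih hr ?_ h4 ?_ ?_
    · rw [hnr]; exact Int.emod_nonneg _ h
    · have he : (old_s - q * s) * num
          = old_s * num - q * (s * num) := by ring
      rw [he]
      exact h3.sub (h4.mul_left _)
    · intro c
      rw [← h5 c]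
      constructor
      · rintro ⟨hc1, hc2⟩
        refine ⟨?_, hc1⟩
        have h9 := dvd_add hc2 (hc1.mul_left q)
        simpa using h9
      · rintro ⟨hc1, hc2⟩
        exact ⟨hc2, dvd_sub hc1 (hc2.mul_left q)⟩

-- before the first time that reaches the minimum, the accumulator stays above G
theorem pv_phase1 (num Z rank0 G t : Int)
    (hkey : ∀ x : Int, 1 ≤ x → x < t →
        num_rank ((x * num) % Z) Z = some rank0 → G < (x * num) % Z) :
    ∀ l : List Int, (∀ x ∈ l, 1 ≤ x ∧ x < t) → ∀ p : Int × Int, G < p.1 →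
    G < (l.foldl (fun p tmp_time =>
          if num_rank ((tmp_time * num) % Z) Z = some rank0 ∧
              (tmp_time * num) % Z < p.1
          then ((tmp_time * num) % Z, tmp_time) else p) p).1 := by
  intro l
  induction l with
  | nil => intro _ p hp; simpa using hp
  | cons a l ih =>
    intro hmem p hp
    simp only [List.foldl_cons]
    refine ih (fun x hx => hmem x (List.mem_cons_of_mem a hx)) _ ?_
    by_cases hc : num_rank ((a * num) % Z) Z = some rank0 ∧ (a * num) % Z < p.1
    · rw [if_pos hc]
      exact hkey a (hmem a List.mem_cons_self).1 (hmem a List.mem_cons_self).2 hc.1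
    · rw [if_neg hc]; exact hp

-- once the accumulator holds the minimum G, it never changes
theorem pv_phase2 (num Z rank0 G : Int)
    (hkey : ∀ x : Int, num_rank ((x * num) % Z) Z = some rank0 → G ≤ (x * num) % Z) :
    ∀ l : List Int, ∀ w : Int,
    (l.foldl (fun p tmp_time =>
          if num_rank ((tmp_time * num) % Z) Z = some rank0 ∧
              (tmp_time * num) % Z < p.1
          then ((tmp_time * num) % Z, tmp_time) else p) (G, w)) = (G, w) := by
  intro l
  induction l with
  | nil => intro w; rfl
  | cons a l ih =>
    intro w
    simp only [List.foldl_cons]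
    have hneg : ¬ (num_rank ((a * num) % Z) Z = some rank0 ∧ (a * num) % Z < G) := by
      rintro ⟨hc1, hc2⟩
      exact absurd hc2 (not_lt.mpr (hkey a hc1))
    rw [if_neg hneg]
    exact ih w

-- the whole fold over [1, t) ++ t :: rest ends in (G, t)
theorem pv_fold_main (num Z rank0 G t : Int)
    (f : Int × Int → Int → Int × Int)
    (hf : f = fun p tmp_time =>
        if num_rank ((tmp_time * num) % Z) Z = some rank0 ∧
            (tmp_time * num) % Z < p.1
        then ((tmp_time * num) % Z, tmp_time) else p)
    (hGle : G ≤ num)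
    (hkey1 : ∀ x : Int, 1 ≤ x → x < t →
        num_rank ((x * num) % Z) Z = some rank0 → G < (x * num) % Z)
    (hkey2 : ∀ x : Int, num_rank ((x * num) % Z) Z = some rank0 → G ≤ (x * num) % Z)
    (hrankG : num_rank ((t * num) % Z) Z = some rank0)
    (htmpt : (t * num) % Z = G)
    (hm1 : G = num → t = 1) :
    ∀ l1 l2 : List Int, (∀ x ∈ l1, 1 ≤ x ∧ x < t) →
    (l1 ++ t :: l2).foldl f (num, 1) = (G, t) := by
  intro l1 l2 hmem
  rw [List.foldl_append, List.foldl_cons]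
  rcases eq_or_lt_of_le hGle with hGeq | hGlt
  · have ht1 : t = 1 := hm1 hGeq
    have hl1 : l1 = [] := by
      refine List.eq_nil_iff_forall_not_mem.mpr (fun x hx => ?_)
      have := hmem x hx; omega
    subst hl1
    simp only [List.foldl_nil]
    have hstep : f (num, 1) t = (num, 1) := by
      rw [hf]; dsimp only
      rw [if_neg]
      rintro ⟨-, hc2⟩
      rw [htmpt] at hc2
      omega
    rw [hstep, show ((num, (1:Int)) : Int × Int) = (G, t) by rw [← hGeq, ht1]]
    have h2 := pv_phase2 num Z rank0 G hkey2 l2 t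
    rw [hf]; exact h2
  · have hp1 := pv_phase1 num Z rank0 G t hkey1 l1 hmem (num, 1) hGlt
    have hstep : f (l1.foldl f (num, 1)) t = (G, t) := by
      conv_lhs => rw [hf]
      dsimp only
      rw [if_pos]
      · rw [htmpt]
      · refine ⟨hrankG, ?_⟩
        rw [htmpt]
        exact hp1
    rw [hstep]
    have h2 := pv_phase2 num Z rank0 G hkey2 l2 t
    rw [hf]; exact h2

-- ===== VERDICT (by name: the statement is the Claim_ definition above) =====
theorem find_least_num_of_same_rank_spec : Claim_equal_find_least_num_of_same_rank := by
  intro num Z hdom hpre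
  unfold Spec_find_least_num_of_same_rank
  by_cases h01 : num = 0 ∨ num = 1
  · simp [find_least_num_of_same_rank, find_least_num_of_same_rank_alt, h01]
  · have hb : 2 ≤ num ∧ num < Z := by
      rcases hpre with h | h | h
      · exact absurd (Or.inl h) h01
      · exact absurd (Or.inr h) h01
      · exact h
    obtain ⟨hnum2, hnumZ⟩ := hb
    have hZ : 0 < Z := by omega
    have hnum0 : 0 < num := by omega
    have hgne : Int.gcd num Z ≠ 0 := by
      intro hc; rw [Int.gcd_eq_zero_iff] at hc; omega
    have hrank := pv_rank_eq num Z (by omega) hnumZ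
    have hdvdiff : ∀ x : Int, Z ∣ x * num ↔ (Z / (Int.gcd num Z : Int)) ∣ x :=
      fun x => pv_dvd_iff num Z x (by omega) hZ
    obtain ⟨hg1, hg2⟩ := pv_egcd num Z num Z 1 0 hnum0 (le_of_lt hZ)
      (by rw [one_mul])
      (by show Int.ModEq Z (0 * num) Z; rw [zero_mul]
          exact (Int.modEq_zero_iff_dvd.mpr dvd_rfl).symm)
      (fun c => Iff.rfl)
    set G : Int := (Int.gcd num Z : Int) with hGdef
    have hGpos : 0 < G := by rw [hGdef]; exact_mod_cast Nat.pos_of_ne_zero hgne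
    have hGnum : G ∣ num := Int.gcd_dvd_left num Z
    have hGZ : G ∣ Z := Int.gcd_dvd_right num Z
    have hGle : G ≤ num := Int.le_of_dvd hnum0 hGnum
    have hGltZ : G < Z := by omega
    set d : Int := Z / G with hddef
    have hdmul : G * d = Z := Int.mul_ediv_cancel' hGZ
    have hdpos : 0 < d := by nlinarith
    have hdZ : d ≤ Z := Int.le_of_dvd hZ ⟨G, by rw [mul_comm]; exact hdmul.symm⟩
    set S : Int := (egcdLoop num Z 1 0).2 with hSdef
    set t : Int := S % d with htdef
    have ht0 : 0 ≤ t := Int.emod_nonneg S (ne_of_gt hdpos)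
    have ht1 : t < d := Int.emod_lt_of_pos S hdpos
    -- t * num ≡ G (mod Z)
    have hddvd : d ∣ (t - S) := ⟨-(S / d), by rw [htdef, Int.emod_def]; ring⟩
    have hZdvd : Z ∣ t * num - S * num := by
      have h1 : Z ∣ (t - S) * num := (hdvdiff _).mpr hddvd
      have h2 : (t - S) * num = t * num - S * num := by ring
      rwa [h2] at h1
    have htc : Int.ModEq Z (t * num) G := by
      refine Int.ModEq.trans ?_ hg2
      exact (Int.modEq_iff_dvd.mpr (by rwa [show S * num - t * num = -(t * num - S * num) by ring, dvd_neg])).symm.symm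
    have htne : t ≠ 0 := by
      intro h0'
      have hdv : Z ∣ G - t * num := Int.modEq_iff_dvd.mp htc
      rw [h0', zero_mul, sub_zero] at hdv
      exact absurd (Int.le_of_dvd hGpos hdv) (by omega)
    have hmin : ∀ u : Int, 1 ≤ u → u < t → ¬ Int.ModEq Z (u * num) G := by
      intro u hu1 hu2 hc
      have hmm : Int.ModEq Z (t * num) (u * num) := htc.trans hc.symm
      have h1 : Z ∣ u * num - t * num := Int.modEq_iff_dvd.mp hmm
      have h2 : Z ∣ (u - t) * num := by
        rwa [show (u - t) * num = u * num - t * num by ring]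
      have h3 : d ∣ (u - t) := (hdvdiff _).mp h2
      have h4 : d ∣ (t - u) := by
        rw [show t - u = -(u - t) by ring]; exact dvd_neg.mpr h3
      have h5 : d ≤ t - u := Int.le_of_dvd (by omega) h4
      omega
    have hmodiff : ∀ x : Int, ((x * num) % Z = G ↔ Int.ModEq Z (x * num) G) := by
      intro x
      have hGZmod : G % Z = G := Int.emod_eq_of_lt (le_of_lt hGpos) hGltZ
      show _ ↔ (x * num) % Z = G % Z
      rw [hGZmod]
    have hcondmp : ∀ x : Int, num_rank ((x * num) % Z) Z = some d →
        (Int.gcd ((x * num) % Z) Z : Int) = G := by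
      intro x hx
      have he0 : 0 ≤ (x * num) % Z := Int.emod_nonneg _ (ne_of_gt hZ)
      have he1 : (x * num) % Z < Z := Int.emod_lt_of_pos _ hZ
      rw [pv_rank_eq _ Z he0 he1] at hx
      have hxx := Option.some.inj hx
      have hgtne : Int.gcd ((x * num) % Z) Z ≠ 0 := by
        intro hc; rw [Int.gcd_eq_zero_iff] at hc; omega
      refine pv_div_inj Z _ G hZ (Int.gcd_dvd_right _ _) hGZ ?_ hGpos ?_
      · exact_mod_cast Nat.pos_of_ne_zero hgtne
      · rw [hxx, hddef]
    have hkey2 : ∀ x : Int, num_rank ((x * num) % Z) Z = some d → G ≤ (x * num) % Z := by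
      intro x hx
      have hg := hcondmp x hx
      have hdvd : G ∣ (x * num) % Z := by
        rw [← hg]; exact Int.gcd_dvd_left _ _
      have hne0 : (x * num) % Z ≠ 0 := by
        intro hc
        rw [hc, Int.gcd_zero_left, Int.natAbs_of_nonneg (le_of_lt hZ)] at hg
        omega
      have he0 : 0 ≤ (x * num) % Z := Int.emod_nonneg _ (ne_of_gt hZ)
      exact Int.le_of_dvd (by omega) hdvd
    have hkey1 : ∀ x : Int, 1 ≤ x → x < t →
        num_rank ((x * num) % Z) Z = some d → G < (x * num) % Z := by
      intro x h1 h2 hx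
      refine lt_of_le_of_ne (hkey2 x hx) (fun he => ?_)
      exact hmin x h1 h2 ((hmodiff x).mp he.symm)
    have hgcdG : (Int.gcd G Z : Int) = G := by
      exact Int.gcd_eq_left (le_of_lt hGpos) hGZ
    have htmpt : (t * num) % Z = G := (hmodiff t).mpr htc
    have hrankG : num_rank ((t * num) % Z) Z = some d := by
      rw [htmpt, pv_rank_eq G Z (le_of_lt hGpos) hGltZ, hgcdG, ← hddef]
    -- B's value
    have hB : find_least_num_of_same_rank_alt num Z = [G, t] := by
      rw [find_least_num_of_same_rank_alt, if_neg h01,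
        if_pos ⟨by rw [PySem.Int.mod_eq_emod_of_pos (by norm_num)]; exact Int.emod_one num,
          by omega, hnumZ⟩]
      simp only [hg1, ← hSdef]
      rw [PySem.Int.floordiv_eq_ediv_of_pos hGpos, ← hddef,
        PySem.Int.mod_eq_emod_of_pos hdpos, ← htdef]
    -- A's value
    have hsplit : PySem.List.pyRange 1 Z 1
        = PySem.List.pyRange 1 t 1 ++ (t :: PySem.List.pyRange (t + 1) Z 1) := by
      have h1 := PySem.List.pyRange_one_append 1 t Z (by omega) (by omega)
      have h2 := PySem.List.pyRange_one_cons (show t < Z by omega)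
      rw [h1, h2]
    have hm1 : G = num → t = 1 := by
      intro hGeq
      by_contra hne
      have h2' : 1 < t := by omega
      refine hmin 1 le_rfl h2' ?_
      show (1 * num) % Z = G % Z
      rw [one_mul, ← hGeq, Int.emod_eq_of_lt (le_of_lt hGpos) hGltZ]
    have hA : find_least_num_of_same_rank num Z = [G, t] := by
      rw [find_least_num_of_same_rank, if_neg h01, hrank]
      simp only [PySem.Int.mod_eq_emod_of_pos hZ]
      rw [hsplit, pv_fold_main num Z d G t _ rfl hGle hkey1 hkey2 hrankG htmpt hm1
        (PySem.List.pyRange 1 t 1) (PySem.List.pyRange (t + 1) Z 1)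
        (fun x hx => by rw [PySem.List.mem_pyRange_one] at hx; exact ⟨hx.1, hx.2⟩)]
    rw [hA, hB]
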